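-- pv_equiv track=rewrite | github.com/Lucas-bSilva/projeto_substituicao_paginas | algorithms.py | fifo_faltas
-- ===== SOURCE A (Python) =====
-- from collections import deque   # Importa deque (fila dupla) para gerenciar ordem de chegada no FIFO
-- from typing import List         # Importa List para anotações de tipo
--
-- def fifo_faltas(referencias: List[int], quadros: int) -> int:
--     if quadros <= 0:                     # Se o número de quadros for zero ou negativo
--         return 0                         # Não há como armazenar páginas → retorna 0
--
--     faltas = 0                           # Contador de faltas de página começa em 0
--     memoria = set()                      # Conjunto que guarda as páginas atualmente carregadas
--     fila = deque()                       # Fila para controlar a ordem em que as páginas entraram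
--
--     for pagina in referencias:           # Percorre cada referência de página na sequência
--         if pagina in memoria:            # Verifica se a página já está na memória
--             continue                     # Se já estiver, segue sem registrar falta
--
--         faltas += 1                      # Caso contrário, conta uma falta de página
--         if len(memoria) < quadros:       # Se ainda houver espaço disponível nos quadros
--             memoria.add(pagina)          # Adiciona a nova página ao conjunto
--             fila.append(pagina)          # Coloca a página na fila de chegada
--         else:                            # Se a memória já estiver cheia
--             sair = fila.popleft()        # Remove a página mais antiga (primeira da fila)
--             memoria.remove(sair)         # Remove essa página também do conjunto
--             memoria.add(pagina)          # Adiciona a nova página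
--             fila.append(pagina)          # E coloca a nova página no final da fila
--
--     return faltas                        # Retorna o total de faltas encontradas
-- ===== SOURCE B (Python) =====
-- def fifo_faltas(referencias, quadros):
--     if quadros <= 0:
--         return 0
--     # Fault-clock method: never materialise the memory contents. Record for each
--     # page the index of the fault that (last) loaded it; a page is resident iff
--     # that index is among the last `quadros` fault indices.
--     faltas = 0
--     carga = {}  # page -> fault index at which it was loaded
--     for pagina in referencias:
--         t = carga.get(pagina)
--         if t is None or t < faltas - quadros:
--             carga[pagina] = faltas
--             faltas += 1
--     return faltas
-- ===== Notes on version B (the rewrite author's own statement) =====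
-- stated objective: alternative
-- what changed: B never simulates the memory contents: instead of A's resident set plus eviction deque it keeps only a fault counter and a page->fault-index map, deciding residency by the arithmetic test 'loaded within the last quadros faults' (FIFO memory = pages loaded by the last quadros faults), so there is no eviction step at all.
import Mathlib
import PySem

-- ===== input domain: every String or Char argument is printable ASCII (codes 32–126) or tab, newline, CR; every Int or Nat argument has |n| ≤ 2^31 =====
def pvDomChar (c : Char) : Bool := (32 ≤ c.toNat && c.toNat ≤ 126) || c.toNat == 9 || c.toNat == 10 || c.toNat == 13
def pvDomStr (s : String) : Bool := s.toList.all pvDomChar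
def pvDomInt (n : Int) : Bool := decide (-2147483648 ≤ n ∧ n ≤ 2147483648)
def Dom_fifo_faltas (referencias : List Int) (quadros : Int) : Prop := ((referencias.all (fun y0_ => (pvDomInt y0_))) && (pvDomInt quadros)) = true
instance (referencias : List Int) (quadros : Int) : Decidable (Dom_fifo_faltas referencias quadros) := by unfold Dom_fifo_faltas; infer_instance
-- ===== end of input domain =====

-- B never simulates the memory contents: it keeps a fault counter and a page->fault-index
-- map and decides residency by 'loaded within the last quadros faults' (objective:
-- alternative; same return value).

-- ===== PORT A =====
-- loop state: (faltas, memoria : set, fila : deque)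
def fifoStepA (quadros : Int) (s : Int × PySem.Set Int × List Int) (pagina : Int) :
    Int × PySem.Set Int × List Int :=
  if PySem.Set.contains s.2.1 pagina then s
  else if PySem.Set.len s.2.1 < quadros then
    (s.1 + 1, PySem.Set.add s.2.1 pagina, s.2.2 ++ [pagina])
  else
    match s.2.2 with
    | [] => (s.1 + 1, PySem.Set.add s.2.1 pagina, [pagina])
    | sair :: resto =>
        (s.1 + 1, PySem.Set.add (PySem.Set.discard s.2.1 sair) pagina, resto ++ [pagina])

def fifo_faltas (referencias : List Int) (quadros : Int) : Int :=
  if quadros ≤ 0 then 0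
  else (referencias.foldl (fifoStepA quadros) (0, PySem.Set.empty, [])).1

-- ===== PORT B =====
-- loop state: (faltas, carga : dict page -> fault index at which it was loaded)
def fifoStepB (quadros : Int) (s : Int × PySem.Dict Int Int) (pagina : Int) :
    Int × PySem.Dict Int Int :=
  match PySem.Dict.get? s.2 pagina with
  | none => (s.1 + 1, PySem.Dict.insert s.2 pagina s.1)
  | some t =>
      if t < s.1 - quadros then (s.1 + 1, PySem.Dict.insert s.2 pagina s.1) else s

def fifo_faltas_alt (referencias : List Int) (quadros : Int) : Int :=
  if quadros ≤ 0 then 0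
  else (referencias.foldl (fifoStepB quadros) (0, PySem.Dict.empty)).1

-- ===== PRECONDITION & SPEC =====
def Spec_fifo_faltas (referencias : List Int) (quadros : Int) (out : Int) : Prop := out = fifo_faltas_alt referencias quadros
instance (referencias : List Int) (quadros : Int) (out : Int) : Decidable (Spec_fifo_faltas referencias quadros out) := by unfold Spec_fifo_faltas; infer_instance

-- ===== CLAIM (what is proved, stated in full; the proofs are below) =====
def Claim_equal_fifo_faltas : Prop := ∀ (referencias : List Int) (quadros : Int), Dom_fifo_faltas referencias quadros → Spec_fifo_faltas referencias quadros (fifo_faltas referencias quadros)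

-- ===== LEMMAS AND PROOFS =====

-- Simulation relation between A's state (faltas, memoria, fila) and B's (faltas, carga):
-- equal fault counts; the set's element list equals the deque; the deque holds min(faltas,
-- quadros) pages whose recorded load indices are exactly the last fila.length fault indices
-- in order; every recorded page not on the deque was loaded more than quadros faults ago.
def FifoInv (quadros : Int) (sA : Int × PySem.Set Int × List Int)
    (sB : Int × PySem.Dict Int Int) : Prop :=
  sA.1 = sB.1 ∧
  (sA.2.1 : List Int) = sA.2.2 ∧
  (sA.2.2.length : Int) = min sB.1 quadros ∧
  (∀ i (hi : i < sA.2.2.length),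
      PySem.Dict.get? sB.2 sA.2.2[i] = some (sB.1 - sA.2.2.length + i)) ∧
  (∀ p t, PySem.Dict.get? sB.2 p = some t → p ∉ sA.2.2 → t < sB.1 - quadros) ∧
  0 ≤ sB.1

lemma fifoStep_inv (quadros : Int) (hq : 0 < quadros)
    (sA : Int × PySem.Set Int × List Int) (sB : Int × PySem.Dict Int Int)
    (h : FifoInv quadros sA sB) (pagina : Int) :
    FifoInv quadros (fifoStepA quadros sA pagina) (fifoStepB quadros sB pagina) := by
  obtain ⟨f, st, fila⟩ := sA
  obtain ⟨g, d⟩ := sB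
  obtain ⟨hf, hst, hlen, hidx, hstale, hg0⟩ := h
  simp only at hf hst hlen hidx hstale hg0 ⊢
  subst hf
  by_cases hm : pagina ∈ fila
  · -- resident: A sees it in the set, B sees a load index within the last quadros faults
    obtain ⟨i, hi, hpi⟩ := List.mem_iff_getElem.mp hm
    have hget := hidx i hi
    rw [hpi] at hget
    have hcs : PySem.Set.contains st pagina = true := by
      simp [PySem.Set.contains, hst, hm]
    have hA : fifoStepA quadros (f, st, fila) pagina = (f, st, fila) := by
      simp only [fifoStepA, hcs, if_true]
    have hB : fifoStepB quadros (f, d) pagina = (f, d) := by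
      simp only [fifoStepB, hget]
      rw [if_neg (by omega)]
    rw [hA, hB]
    exact ⟨rfl, hst, hlen, hidx, hstale, hg0⟩
  · -- fault in both
    have hcs : PySem.Set.contains st pagina = false := by
      simp [PySem.Set.contains, hst, hm]
    have hpst : pagina ∉ (st : List Int) := by rw [hst]; exact hm
    have hB : fifoStepB quadros (f, d) pagina = (f + 1, PySem.Dict.insert d pagina f) := by
      cases hget : PySem.Dict.get? d pagina with
      | none => simp [fifoStepB, hget]
      | some t =>
          have hlt := hstale pagina t hget hm
          simp only [fifoStepB, hget]
          rw [if_pos hlt]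
    have hlenA : PySem.Set.len st = (fila.length : Int) := by
      simp [PySem.Set.len, hst]
    have hadd : (PySem.Set.add st pagina : List Int) = st ++ [pagina] := by
      simp [PySem.Set.add, PySem.Set.contains, hpst]
    have hidx' : ∀ p' t, p' ≠ pagina →
        PySem.Dict.get? (PySem.Dict.insert d pagina f) p' = some t →
        PySem.Dict.get? d p' = some t := by
      intro p' t hne hh
      rwa [PySem.Dict.get?_insert_of_ne _ _ hne] at hh
    by_cases hfill : (fila.length : Int) < quadros
    · -- room left: A appends to the deque, B records load index f
      have hA : fifoStepA quadros (f, st, fila) pagina =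
          (f + 1, PySem.Set.add st pagina, fila ++ [pagina]) := by
        simp only [fifoStepA, hcs, Bool.false_eq_true, if_false]
        rw [if_pos (by rw [hlenA]; exact hfill)]
      rw [hA, hB]
      refine ⟨rfl, by rw [hadd, hst], by simp; omega, ?_, ?_, by omega⟩
      · intro i hi
        simp only [List.length_append, List.length_cons, List.length_nil] at hi ⊢
        by_cases hil : i < fila.length
        · rw [List.getElem_append_left hil]
          have hne : fila[i] ≠ pagina := fun hh => hm (hh ▸ fila.getElem_mem hil)
          rw [PySem.Dict.get?_insert_of_ne _ _ hne, hidx i hil]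
          congr 1
          push_cast
          ring
        · have hie : i = fila.length := by omega
          subst hie
          rw [List.getElem_append_right (le_refl _)]
          simp only [Nat.sub_self, List.getElem_cons_zero]
          rw [PySem.Dict.get?_insert_self]
          congr 1
          push_cast
          ring
      · intro p t hget hpm
        have hne : p ≠ pagina := fun hh =>
          hpm (by rw [hh]; exact List.mem_append_right _ (List.mem_singleton_self _))
        have hpf : p ∉ fila := fun hh => hpm (List.mem_append_left _ hh)
        have := hstale p t (hidx' p t hne hget) hpf
        omega
    · -- memory full: A evicts the deque head; B's entry for it just falls out of the window
      have hql : (fila.length : Int) = quadros := by omega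
      obtain ⟨sair, resto, hfe⟩ : ∃ a r, fila = a :: r := by
        cases fila with
        | nil => exact absurd hql (by simp; omega)
        | cons a r => exact ⟨a, r, rfl⟩
      have hsg : PySem.Dict.get? d sair = some (f - fila.length) := by
        have h1 := hidx 0 (by rw [hfe]; simp)
        simp only [hfe, List.getElem_cons_zero] at h1
        rw [hfe]
        simpa using h1
      have hsr : sair ∉ resto := by
        intro hmem
        obtain ⟨j, hj, hjs⟩ := List.mem_iff_getElem.mp hmem
        have h2 := hidx (j + 1) (by rw [hfe]; simpa using hj)
        simp only [hfe, List.getElem_cons_succ] at h2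
        rw [hjs, hsg] at h2
        have := Option.some.inj h2
        rw [hfe] at this
        simp only [List.length_cons] at this
        omega
      have hdisc : (PySem.Set.discard st sair : List Int) = resto := by
        rw [hst, hfe]
        simp [PySem.Set.discard]
        exact fun a ha hh => hsr (hh ▸ ha)
      have hpr : pagina ∉ resto := fun hh => hm (by rw [hfe]; exact List.mem_cons_of_mem _ hh)
      have haddd : (PySem.Set.add (PySem.Set.discard st sair) pagina : List Int) =
          resto ++ [pagina] := by
        rw [PySem.Set.add, hdisc]
        simp [hpr]
      have hA : fifoStepA quadros (f, st, fila) pagina =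
          (f + 1, PySem.Set.add (PySem.Set.discard st sair) pagina, resto ++ [pagina]) := by
        simp only [fifoStepA, hcs, Bool.false_eq_true, if_false, hfe]
        rw [if_neg (by rw [hlenA]; exact hfill)]
      rw [hA, hB]
      have hrl : (resto.length : Int) + 1 = quadros := by
        rw [hfe] at hql
        simp only [List.length_cons] at hql
        push_cast at hql ⊢
        omega
      refine ⟨rfl, haddd, by simp; omega, ?_, ?_, by omega⟩
      · intro i hi
        simp only [List.length_append, List.length_cons, List.length_nil] at hi ⊢
        by_cases hil : i < resto.length
        · rw [List.getElem_append_left hil]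
          have hmemr : resto[i] ∈ fila := by
            rw [hfe]; exact List.mem_cons_of_mem _ (resto.getElem_mem hil)
          have hne : resto[i] ≠ pagina := fun hh => hm (hh ▸ hmemr)
          have h3 := hidx (i + 1) (by rw [hfe]; simpa using hil)
          simp only [hfe, List.getElem_cons_succ, List.length_cons] at h3
          rw [PySem.Dict.get?_insert_of_ne _ _ hne, h3]
          congr 1
          push_cast
          ring
        · have hie : i = resto.length := by omega
          subst hie
          rw [List.getElem_append_right (le_refl _)]
          simp only [Nat.sub_self, List.getElem_cons_zero]
          rw [PySem.Dict.get?_insert_self]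
          congr 1
          omega
      · intro p t hget hpm
        have hne : p ≠ pagina := fun hh =>
          hpm (by rw [hh]; exact List.mem_append_right _ (List.mem_singleton_self _))
        have hget' := hidx' p t hne hget
        by_cases hps : p = sair
        · rw [hps, hsg] at hget'
          have := Option.some.inj hget'
          omega
        · have hpf : p ∉ fila := by
            rw [hfe]
            intro hh
            rcases List.mem_cons.mp hh with hh1 | hh2
            · exact hps hh1
            · exact hpm (List.mem_append_left _ hh2)
          have := hstale p t hget' hpf
          omega

lemma fifoFold_inv (quadros : Int) (hq : 0 < quadros) (refs : List Int) :
    ∀ (sA : Int × PySem.Set Int × List Int) (sB : Int × PySem.Dict Int Int),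
      FifoInv quadros sA sB →
      FifoInv quadros (refs.foldl (fifoStepA quadros) sA) (refs.foldl (fifoStepB quadros) sB) := by
  induction refs with
  | nil => intro sA sB h; exact h
  | cons r rs ih => intro sA sB h; exact ih _ _ (fifoStep_inv quadros hq sA sB h r)

-- ===== VERDICT (by name: the statement is the Claim_ definition above) =====
theorem fifo_faltas_spec : Claim_equal_fifo_faltas := by
  intro referencias quadros _
  unfold Spec_fifo_faltas fifo_faltas fifo_faltas_alt
  by_cases hq : quadros ≤ 0
  · simp [hq]
  · simp only [if_neg hq]
    have h0 : FifoInv quadros (0, PySem.Set.empty, []) (0, PySem.Dict.empty) := by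
      refine ⟨rfl, rfl, by simp; omega, ?_, ?_, le_refl 0⟩
      · intro i hi; simp at hi
      · intro p t hget; simp [PySem.Dict.get?_empty] at hget
    exact (fifoFold_inv quadros (by omega) referencias _ _ h0).1
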